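-- pv_equiv track=rewrite | github.com/dougman7777/Work-tools-streamlit | app.py | build_wave_path
-- ===== SOURCE A (Python) =====
-- def build_wave_path(output1, start_loc):
--     def get_clli(loc):
--         return loc[:8] if len(loc) >= 8 else loc
--
--     def get_suffix_type(loc):
--         if len(loc) > 8:
--             return loc[8:9]
--         return ''
--
--     routes = []
--     original_unique_routes = set(output1)
--     for line in output1:
--         parts = line.split()
--         if len(parts) < 2:
--             continue
--         number = parts[0]
--         facility = parts[1]
--         path_parts = facility.split('/')
--         if len(path_parts) != 4:
--             continue
--         _, fiber_type, loc1, loc2 = path_parts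
--         routes.append({
--             'number': number,
--             'fiber_type': fiber_type,
--             'loc1': loc1,
--             'loc2': loc2,
--             'line': line,
--             'loc1_clli': get_clli(loc1),
--             'loc2_clli': get_clli(loc2)
--         })
--         routes.append({
--             'number': number,
--             'fiber_type': fiber_type,
--             'loc1': loc2,
--             'loc2': loc1,
--             'line': line,
--             'loc1_clli': get_clli(loc2),
--             'loc2_clli': get_clli(loc1)
--         })
--
--     used_lines = set()
--     final_routes = []
--     system_changes = 0
--     original_routes_count = len(original_unique_routes)
--
--     start_loc = get_clli(start_loc.strip().upper())
--     current_loc = None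
--     prev_suffix = None
--
--     for route in routes:
--         if route['loc1_clli'] == start_loc:
--             final_routes.append(route['line'])
--             used_lines.add(route['line'])
--             current_loc = route['loc2_clli']
--             prev_suffix = get_suffix_type(route['loc1'])
--             break
--
--     if not final_routes:
--         return ["Error: Could not find starting location in parsed routes."], [], f"Original Routes: {original_routes_count} | Final Routes: 0 | System Changes: 0"
--
--     while True:
--         found = False
--         for route in routes:
--             if route['line'] in used_lines:
--                 continue
--             if route['loc1_clli'] == current_loc:
--                 curr_suffix = get_suffix_type(route['loc1'])
--                 if prev_suffix and curr_suffix and prev_suffix != curr_suffix: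
--                     final_routes.append('--- SYSTEM CHANGE ---')
--                     system_changes += 1
--                 final_routes.append(route['line'])
--                 used_lines.add(route['line'])
--                 current_loc = route['loc2_clli']
--                 prev_suffix = get_suffix_type(route['loc2'])
--                 found = True
--                 break
--         if not found:
--             break
--
--     final_routes_count = len([line for line in final_routes if not line.startswith('---')])
--     summary = f"Original Routes: {original_routes_count} | Final Routes: {final_routes_count} | System Changes: {system_changes}"
--     output3 = [line for line in output1]
--     return final_routes, output3, summary
-- ===== SOURCE B (Python) =====
-- def build_wave_path(output1, start_loc):
--     # Index directed routes by the CLLI of their origin; chain by popping from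
--     # per-origin stacks instead of rescanning the whole route list each step.
--     def clli(loc):
--         return loc[:8]
--
--     def sfx(loc):
--         return loc[8:9]
--
--     pairs = []
--     for line in output1:
--         parts = line.split()
--         if len(parts) < 2:
--             continue
--         pp = parts[1].split('/')
--         if len(pp) != 4:
--             continue
--         _, _, l1, l2 = pp
--         pairs.append((clli(l1), (line, sfx(l1), clli(l2), sfx(l2))))
--         pairs.append((clli(l2), (line, sfx(l2), clli(l1), sfx(l1))))
--
--     buckets = {}
--     for key, entry in pairs:
--         buckets.setdefault(key, []).append(entry)
--     for stack in buckets.values():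
--         stack.reverse()  # pop() from the end yields routes in original order
--
--     used = set()
--
--     def pop_next(key):
--         stack = buckets.get(key)
--         while stack:
--             entry = stack.pop()
--             if entry[0] not in used:
--                 return entry
--         return None
--
--     original_routes_count = len(set(output1))
--     target = clli(start_loc.strip().upper())
--
--     entry = pop_next(target)
--     if entry is None:
--         return ["Error: Could not find starting location in parsed routes."], [], f"Original Routes: {original_routes_count} | Final Routes: 0 | System Changes: 0"
--
--     final_routes = [entry[0]]
--     used.add(entry[0])
--     current, prev_suffix = entry[2], entry[1]
--     system_changes = 0
--
--     while True:
--         entry = pop_next(current)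
--         if entry is None:
--             break
--         if prev_suffix and entry[1] and prev_suffix != entry[1]:
--             final_routes.append('--- SYSTEM CHANGE ---')
--             system_changes += 1
--         final_routes.append(entry[0])
--         used.add(entry[0])
--         current, prev_suffix = entry[2], entry[3]
--
--     final_routes_count = sum(1 for line in final_routes if not line.startswith('---'))
--     summary = f"Original Routes: {original_routes_count} | Final Routes: {final_routes_count} | System Changes: {system_changes}"
--     return final_routes, list(output1), summary
-- ===== Notes on version B (the rewrite author's own statement) =====
-- stated objective: alternative
-- what changed: B indexes the parsed directed routes by origin CLLI into per-key stacks consumed in order with used lines skipped, replacing A's rescan of the whole route list on every chaining step.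
import Mathlib
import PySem

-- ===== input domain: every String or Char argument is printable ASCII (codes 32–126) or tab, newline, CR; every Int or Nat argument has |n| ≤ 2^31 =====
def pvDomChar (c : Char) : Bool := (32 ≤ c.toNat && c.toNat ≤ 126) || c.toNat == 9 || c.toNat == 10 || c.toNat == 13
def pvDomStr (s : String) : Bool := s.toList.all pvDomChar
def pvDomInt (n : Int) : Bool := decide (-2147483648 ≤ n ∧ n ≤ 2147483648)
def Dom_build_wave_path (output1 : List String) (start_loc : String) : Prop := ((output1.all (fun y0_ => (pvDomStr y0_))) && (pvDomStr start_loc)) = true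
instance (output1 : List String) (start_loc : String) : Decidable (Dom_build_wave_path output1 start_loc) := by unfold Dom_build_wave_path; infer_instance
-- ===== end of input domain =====

-- B replaces A's full rescan of the route list at every chaining step by per-origin-CLLI
-- stacks consumed in order (used lines skipped) — a different chaining algorithm, same value.

-- ===== PORT A =====

structure RouteA where
  number : String
  fiber_type : String
  loc1 : String
  loc2 : String
  line : String
  loc1_clli : String
  loc2_clli : String
deriving DecidableEq, Repr

-- get_clli: loc[:8] if len(loc) >= 8 else loc
def get_clliA (loc : String) : String :=
  if 8 ≤ PySem.Str.len loc then PySem.Str.slice loc none (some 8) else loc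

-- get_suffix_type: loc[8:9] if len(loc) > 8 else ''
def get_suffixA (loc : String) : String :=
  if 8 < PySem.Str.len loc then PySem.Str.slice loc (some 8) (some 9) else ""

-- one iteration of the parsing for-loop: appends the two direction records of a well-formed line
def stepA (routes : List RouteA) (line : String) : List RouteA :=
  let parts := PySem.Str.split₀ line
  if parts.length < 2 then routes else
  let number := parts.getD 0 ""
  let facility := parts.getD 1 ""
  let path_parts := (PySem.Str.split? facility "/").getD []   -- sep "/" ≠ "": split? is always some
  if path_parts.length ≠ 4 then routes else
  let fiber_type := path_parts.getD 1 ""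
  let loc1 := path_parts.getD 2 ""
  let loc2 := path_parts.getD 3 ""
  routes ++ [⟨number, fiber_type, loc1, loc2, line, get_clliA loc1, get_clliA loc2⟩,
             ⟨number, fiber_type, loc2, loc1, line, get_clliA loc2, get_clliA loc1⟩]

def parseA (output1 : List String) : List RouteA := output1.foldl stepA []

-- the 'while True' chaining loop; fuel = routes.length + 1 only totalizes it (each
-- successful iteration adds a fresh line to used, so the fuel is never exhausted)
def loopA (fuel : Nat) (routes : List RouteA) (used : PySem.Set String)
    (final : List String) (cur prev : String) (sys : Int) : List String × Int :=
  match fuel with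
  | 0 => (final, sys)
  | fuel + 1 =>
    match routes.find? (fun r => !(used.contains r.line) && (r.loc1_clli == cur)) with
    | none => (final, sys)
    | some route =>
      let curs := get_suffixA route.loc1
      let final := if prev ≠ "" ∧ curs ≠ "" ∧ prev ≠ curs then final ++ ["--- SYSTEM CHANGE ---"] else final
      let sys := if prev ≠ "" ∧ curs ≠ "" ∧ prev ≠ curs then sys + 1 else sys
      loopA fuel routes (PySem.Set.add used route.line) (final ++ [route.line])
        route.loc2_clli (get_suffixA route.loc2) sys

def build_wave_path (output1 : List String) (start_loc : String) : List String × List String × String :=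
  let routes := parseA output1
  let original_routes_count : Int := ((PySem.Set.ofList output1).length : Int)
  let start := get_clliA (PySem.Str.upper (PySem.Str.strip start_loc))
  match routes.find? (fun r => r.loc1_clli == start) with
  | none =>
    (["Error: Could not find starting location in parsed routes."], [],
     "Original Routes: " ++ PySem.Int.toStr original_routes_count ++ " | Final Routes: 0 | System Changes: 0")
  | some r0 =>
    let used := PySem.Set.add PySem.Set.empty r0.line
    let (final, sys) := loopA (routes.length + 1) routes used [r0.line] r0.loc2_clli (get_suffixA r0.loc1) 0
    let final_count : Int := (final.countP (fun l => !(PySem.Str.startswith l "---")) : Int)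
    (final, output1,
     "Original Routes: " ++ PySem.Int.toStr original_routes_count ++ " | Final Routes: " ++
       PySem.Int.toStr final_count ++ " | System Changes: " ++ PySem.Int.toStr sys)

-- ===== PORT B =====

-- entry stored per route direction: (line, suffix of origin, CLLI of target, suffix of target)
abbrev EntryB : Type := String × String × String × String

def clliB (loc : String) : String := PySem.Str.slice loc none (some 8)

def sfxB (loc : String) : String := PySem.Str.slice loc (some 8) (some 9)

-- one iteration of B's parsing loop: the two keyed direction entries of a well-formed line
def stepB (pairs : List (String × EntryB)) (line : String) : List (String × EntryB) :=
  let parts := PySem.Str.split₀ line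
  if parts.length < 2 then pairs else
  let pp := (PySem.Str.split? (parts.getD 1 "") "/").getD []   -- sep "/" ≠ "": split? is always some
  if pp.length ≠ 4 then pairs else
  let l1 := pp.getD 2 ""
  let l2 := pp.getD 3 ""
  pairs ++ [(clliB l1, (line, sfxB l1, clliB l2, sfxB l2)),
            (clliB l2, (line, sfxB l2, clliB l1, sfxB l1))]

def parseB (output1 : List String) : List (String × EntryB) := output1.foldl stepB []

-- buckets: origin CLLI ↦ its entries in original order.  (Python reverses each bucket
-- once and pops from the END; the port keeps the forward list and consumes its HEAD —
-- the identical stack discipline.)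
def bucketsB (pairs : List (String × EntryB)) : PySem.Dict String (List EntryB) :=
  pairs.foldl (fun d p => d.modify p.1 [] (· ++ [p.2])) PySem.Dict.empty

-- pop_next's inner while: discard used entries, return the first live one plus the rest
def skimB (used : PySem.Set String) : List EntryB → Option EntryB × List EntryB
  | [] => (none, [])
  | e :: rest => if used.contains e.1 then skimB used rest else (some e, rest)

def popNextB (d : PySem.Dict String (List EntryB)) (used : PySem.Set String) (key : String) :
    Option EntryB × PySem.Dict String (List EntryB) :=
  let or := skimB used (d.getD key [])
  (or.1, d.insert key or.2)

def loopB (fuel : Nat) (d : PySem.Dict String (List EntryB)) (used : PySem.Set String)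
    (final : List String) (cur prev : String) (sys : Int) : List String × Int :=
  match fuel with
  | 0 => (final, sys)
  | fuel + 1 =>
    let p := popNextB d used cur
    match p.1 with
    | none => (final, sys)
    | some e =>
      let final := if prev ≠ "" ∧ e.2.1 ≠ "" ∧ prev ≠ e.2.1 then final ++ ["--- SYSTEM CHANGE ---"] else final
      let sys := if prev ≠ "" ∧ e.2.1 ≠ "" ∧ prev ≠ e.2.1 then sys + 1 else sys
      loopB fuel p.2 (PySem.Set.add used e.1) (final ++ [e.1]) e.2.2.1 e.2.2.2 sys

def build_wave_path_alt (output1 : List String) (start_loc : String) : List String × List String × String :=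
  let pairs := parseB output1
  let buckets := bucketsB pairs
  let original_routes_count : Int := ((PySem.Set.ofList output1).length : Int)
  let target := clliB (PySem.Str.upper (PySem.Str.strip start_loc))
  let p0 := popNextB buckets PySem.Set.empty target
  match p0.1 with
  | none =>
    (["Error: Could not find starting location in parsed routes."], [],
     "Original Routes: " ++ PySem.Int.toStr original_routes_count ++ " | Final Routes: 0 | System Changes: 0")
  | some e =>
    let (final, sys) := loopB (pairs.length + 1) p0.2 (PySem.Set.add PySem.Set.empty e.1)
      [e.1] e.2.2.1 e.2.1 0
    let final_count : Int := (final.countP (fun l => !(PySem.Str.startswith l "---")) : Int)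
    (final, output1,
     "Original Routes: " ++ PySem.Int.toStr original_routes_count ++ " | Final Routes: " ++
       PySem.Int.toStr final_count ++ " | System Changes: " ++ PySem.Int.toStr sys)

-- ===== PRECONDITION & SPEC =====
def Spec_build_wave_path (output1 : List String) (start_loc : String) (out : List String × List String × String) : Prop := out = build_wave_path_alt output1 start_loc
instance (output1 : List String) (start_loc : String) (out : List String × List String × String) : Decidable (Spec_build_wave_path output1 start_loc out) := by unfold Spec_build_wave_path; infer_instance

-- ===== CLAIM (what is proved, stated in full; the proofs are below) =====
def Claim_equal_build_wave_path : Prop := ∀ (output1 : List String) (start_loc : String), Dom_build_wave_path output1 start_loc → Spec_build_wave_path output1 start_loc (build_wave_path output1 start_loc)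

-- ===== LEMMAS AND PROOFS =====

-- A's branchy get_clli equals the unconditional slice
theorem clli_eq (loc : String) : get_clliA loc = clliB loc := by
  unfold get_clliA clliB
  split_ifs with h
  · rfl
  · apply String.toList_inj.mp
    rw [PySem.Str.toList_slice]
    simp only [PySem.Chars.slice_eq_listSlice]
    rw [PySem.List.slice_to loc.toList (b := 8) (by norm_num)]
    refine (List.take_of_length_le ?_).symm
    have := PySem.Str.len_eq loc
    omega

-- A's branchy get_suffix_type equals the unconditional slice
theorem sfx_eq (loc : String) : get_suffixA loc = sfxB loc := by
  unfold get_suffixA sfxB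
  split_ifs with h
  · rfl
  · apply String.toList_inj.mp
    rw [PySem.Str.toList_slice]
    simp only [PySem.Chars.slice_eq_listSlice]
    rw [PySem.List.slice_toNat _ (by norm_num) (by norm_num)]
    have := PySem.Str.len_eq loc
    have hd : loc.toList.drop (8 : Int).toNat = [] := by
      apply List.drop_eq_nil_of_le; omega
    rw [hd, List.take_nil]
    rfl

-- projections from A's route record to B's keyed entry
def entryOf (r : RouteA) : EntryB := (r.line, sfxB r.loc1, r.loc2_clli, sfxB r.loc2)

def pairOf (r : RouteA) : String × EntryB := (r.loc1_clli, entryOf r)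

theorem step_corr (acc : List RouteA) (line : String) :
    stepB (acc.map pairOf) line = (stepA acc line).map pairOf := by
  unfold stepA stepB
  dsimp only
  split_ifs with h1 h2
  · rfl
  · rfl
  · simp [pairOf, entryOf, clli_eq]

-- the two parsing loops build the same data
theorem parse_corr (output1 : List String) : parseB output1 = (parseA output1).map pairOf := by
  unfold parseA parseB
  suffices h : ∀ (l : List String) (acc : List RouteA),
      l.foldl stepB (acc.map pairOf) = (l.foldl stepA acc).map pairOf by
    exact h output1 []
  intro l
  induction l with
  | nil => intro acc; rfl
  | cons line rest ih =>
    intro acc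
    simp only [List.foldl_cons, step_corr, ih]

-- first live entry of a stack is its first unused element
theorem skim_fst (used : PySem.Set String) (b : List EntryB) :
    (skimB used b).1 = b.find? (fun e => !(used.contains e.1)) := by
  induction b with
  | nil => rfl
  | cons e rest ih =>
    rw [skimB, List.find?_cons]
    by_cases h : used.contains e.1 = true
    · rw [if_pos h, ih, h]; rfl
    · rw [Bool.not_eq_true] at h
      rw [if_neg (by rw [h]; exact Bool.false_ne_true), h]; rfl

-- a successful skim splits the stack into a used prefix, the hit, and the rest
theorem skim_decomp (used : PySem.Set String) (b : List EntryB) (e : EntryB) (rest : List EntryB)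
    (h : skimB used b = (some e, rest)) :
    ∃ sk, b = sk ++ e :: rest ∧ ∀ x ∈ sk, used.contains x.1 = true := by
  induction b generalizing rest with
  | nil => simp [skimB] at h
  | cons y ys ih =>
    by_cases hy : used.contains y.1 = true
    · rw [skimB, if_pos hy] at h
      obtain ⟨sk, h1, h2⟩ := ih rest h
      refine ⟨y :: sk, by simp [h1], ?_⟩
      intro x hx
      rcases List.mem_cons.mp hx with rfl | hx
      · exact hy
      · exact h2 x hx
    · rw [skimB, if_neg hy] at h
      obtain ⟨he, hr⟩ := Prod.mk.injEq .. ▸ h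
      refine ⟨[], by simp_all, by simp⟩

-- the bucket invariant: each bucket is what remains of the key's filtered pair list,
-- the consumed prefix being entirely used lines
def BInv (pairs : List (String × EntryB)) (d : PySem.Dict String (List EntryB))
    (used : PySem.Set String) : Prop :=
  ∀ c, ∃ dropped, (pairs.filter (fun p => p.1 == c)).map (·.2) = dropped ++ d.getD c [] ∧
    ∀ e ∈ dropped, used.contains e.1 = true

-- A's scan of all routes = the first unused entry of the filtered pair list
theorem find_corr (routes : List RouteA) (used : PySem.Set String) (c : String) :
    (((routes.map pairOf).filter (fun p => p.1 == c)).map (·.2)).find? (fun e => !(used.contains e.1))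
      = (routes.find? (fun r => !(used.contains r.line) && (r.loc1_clli == c))).map entryOf := by
  rw [List.filter_map, List.map_map, List.find?_map, List.find?_filter]
  congr 1
  apply congrArg (fun p => List.find? p routes)
  funext r
  by_cases hm : r.line ∈ used
  · cases hc : (r.loc1_clli == c) <;> simp [pairOf, entryOf, hc, hm]
  · cases hc : (r.loc1_clli == c) <;> simp [pairOf, entryOf, hc, hm]

theorem used_mono (used : PySem.Set String) (x y : String) (h : used.contains y = true) :
    (PySem.Set.add used x).contains y = true :=
  (PySem.Set.contains_iff (used.add x) y).mpr
    ((PySem.Set.mem_add used x y).mpr (Or.inl ((PySem.Set.contains_iff used y).mp h)))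

theorem contains_add_self (used : PySem.Set String) (x : String) :
    (PySem.Set.add used x).contains x = true :=
  (PySem.Set.contains_iff (used.add x) x).mpr ((PySem.Set.mem_add used x x).mpr (Or.inr rfl))

-- a pop preserves the invariant: the skipped prefix and the hit move into the used side
theorem inv_step (pairs : List (String × EntryB)) (d : PySem.Dict String (List EntryB))
    (used : PySem.Set String) (cur : String) (e : EntryB) (rest : List EntryB)
    (hinv : BInv pairs d used) (hsk : skimB used (d.getD cur []) = (some e, rest)) :
    BInv pairs (d.insert cur rest) (PySem.Set.add used e.1) := by
  obtain ⟨dropped, hsplit, hused⟩ := hinv cur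
  obtain ⟨sk, hbsplit, hskused⟩ := skim_decomp used (d.getD cur []) e rest hsk
  intro c
  by_cases hc : c = cur
  · subst hc
    refine ⟨dropped ++ sk ++ [e], ?_, ?_⟩
    · rw [PySem.Dict.getD_insert_self, hsplit, hbsplit]; simp
    · intro x hx
      simp only [List.append_assoc, List.mem_append, List.mem_singleton] at hx
      rcases hx with hx | hx | hx
      · exact used_mono _ _ _ (hused x hx)
      · exact used_mono _ _ _ (hskused x hx)
      · rw [hx]; exact contains_add_self _ _
  · obtain ⟨dr, h1, h2⟩ := hinv c
    refine ⟨dr, ?_, fun x hx => used_mono _ _ _ (h2 x hx)⟩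
    rw [PySem.Dict.getD_insert_of_ne _ _ _ hc, h1]

-- the two chaining loops agree under the invariant
theorem loop_corr (fuel : Nat) (routes : List RouteA) (d : PySem.Dict String (List EntryB))
    (used : PySem.Set String) (final : List String) (cur prev : String) (sys : Int)
    (hinv : BInv (routes.map pairOf) d used) :
    loopA fuel routes used final cur prev sys = loopB fuel d used final cur prev sys := by
  induction fuel generalizing d used final cur prev sys with
  | zero => rfl
  | succ fuel ih =>
    obtain ⟨dropped, hsplit, hused⟩ := hinv cur
    have hdnone : List.find? (fun e : EntryB => !(used.contains e.1)) dropped = none :=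
      List.find?_eq_none.mpr (fun e he => by rw [hused e he]; simp)
    have hfind : (d.getD cur []).find? (fun e => !(used.contains e.1))
        = (routes.find? (fun r => !(used.contains r.line) && (r.loc1_clli == cur))).map entryOf := by
      rw [← find_corr routes used cur, hsplit, List.find?_append, hdnone, Option.none_or]
    rcases hsk : skimB used (d.getD cur []) with ⟨o, rest⟩
    have ho : o = ((routes.find? (fun r => !(used.contains r.line) && (r.loc1_clli == cur))).map entryOf) := by
      rw [← hfind, ← skim_fst, hsk]
    -- continue below
    subst ho
    rw [loopA, loopB]
    simp only [popNextB, hsk]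
    cases hA : routes.find? (fun r => !(used.contains r.line) && (r.loc1_clli == cur)) with
    | none => rfl
    | some route =>
      simp only [Option.map_some]
      have hsfx1 : get_suffixA route.loc1 = (entryOf route).2.1 := by simp [entryOf, sfx_eq]
      have hsfx2 : get_suffixA route.loc2 = (entryOf route).2.2.2 := by simp [entryOf, sfx_eq]
      rw [hsfx1, hsfx2]
      have hline : route.line = (entryOf route).1 := rfl
      have hclli2 : route.loc2_clli = (entryOf route).2.2.1 := rfl
      rw [hline, hclli2]
      exact ih _ _ _ _ _ _ (inv_step _ _ _ _ _ _ hinv (by rw [hsk, hA]; rfl))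

-- the initial bucket state satisfies the invariant with nothing consumed
theorem inv_init (pairs : List (String × EntryB)) : BInv pairs (bucketsB pairs) PySem.Set.empty := by
  intro c
  refine ⟨[], ?_, by simp⟩
  rw [bucketsB, PySem.Dict.getD_foldl_modify_append, PySem.Dict.getD_empty]
  rfl

-- ===== VERDICT (by name: the statement is the Claim_ definition above) =====
theorem build_wave_path_spec : Claim_equal_build_wave_path := by
  intro output1 start_loc _
  unfold Spec_build_wave_path build_wave_path build_wave_path_alt
  rw [parse_corr, clli_eq]
  set routes := parseA output1 with hroutes
  set start := clliB (PySem.Str.upper (PySem.Str.strip start_loc)) with hstart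
  -- the initial lookup: A's find? (no used lines yet) = B's first pop
  obtain ⟨dropped0, hsplit0, hused0⟩ := inv_init (routes.map pairOf) start
  have hdropped0 : dropped0 = [] := by
    cases h : dropped0 with
    | nil => rfl
    | cons x xs => exact absurd (hused0 x (h ▸ List.mem_cons_self)) (by simp [PySem.Set.empty])
  have hfind0 : ((bucketsB (routes.map pairOf)).getD start []).find?
      (fun e => !((PySem.Set.empty : PySem.Set String).contains e.1))
      = (routes.find? (fun r => r.loc1_clli == start)).map entryOf := by
    rw [show ((bucketsB (routes.map pairOf)).getD start []) =
        ((routes.map pairOf).filter (fun p => p.1 == start)).map (·.2) by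
      rw [hsplit0, hdropped0, List.nil_append],
      find_corr]
    exact congrArg _ (congrArg (fun p => List.find? p routes)
      (funext fun r => by simp [PySem.Set.empty]))
  rcases hsk : skimB PySem.Set.empty ((bucketsB (routes.map pairOf)).getD start []) with ⟨o, rest⟩
  have ho : o = (routes.find? (fun r => r.loc1_clli == start)).map entryOf := by
    rw [← hfind0, ← skim_fst, hsk]
  subst ho
  simp only [popNextB, hsk]
  cases hA : routes.find? (fun r => r.loc1_clli == start) with
  | none => rfl
  | some r0 =>
    simp only [Option.map_some]
    have hloop : loopA (routes.length + 1) routes (PySem.Set.add PySem.Set.empty r0.line)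
        [r0.line] r0.loc2_clli (get_suffixA r0.loc1) 0
      = loopB ((routes.map pairOf).length + 1) ((bucketsB (routes.map pairOf)).insert start rest)
        (PySem.Set.add PySem.Set.empty (entryOf r0).1)
        [(entryOf r0).1] (entryOf r0).2.2.1 (entryOf r0).2.1 0 := by
      rw [List.length_map]
      have h1 : (entryOf r0).1 = r0.line := rfl
      have h2 : (entryOf r0).2.2.1 = r0.loc2_clli := rfl
      have h3 : (entryOf r0).2.1 = get_suffixA r0.loc1 := by simp [entryOf, sfx_eq]
      rw [h1, h2, h3]
      exact loop_corr _ _ _ _ _ _ _ _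
        (inv_step _ _ _ _ _ _ (inv_init (routes.map pairOf)) (by rw [hsk, hA]; rfl))
    rw [hloop]
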